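-- pv_equiv track=rewrite | github.com/jolleyjames/Advent-of-Code-2020 | day07.py | count_total_bags_inside
-- ===== SOURCE A (Python) =====
-- def count_total_bags_inside(rules, bag, evaluated_bags=None):
--     '''
--     Given a dict of bag colors keyed to the bags they can contain, return
--     the total number of bags contained by the specified bag color.
--     '''
--     if bag not in rules:
--         raise ValueError('bag not found in rules')
--     # Keep a running total of the total number of bags within a bag
--     if evaluated_bags is None:
--         evaluated_bags = {}
--     evaluated_bags[bag] = [0, list(rules[bag])]
--     while evaluated_bags[bag][1]:
--         count, inner_bag = evaluated_bags[bag][1][-1]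
--         if inner_bag not in evaluated_bags:
--             count_total_bags_inside(rules, inner_bag, evaluated_bags)
--
--         evaluated_bags[bag][0] += (count * (1+evaluated_bags[inner_bag][0]))
--         evaluated_bags[bag][1].pop()
--
--     return evaluated_bags[bag][0]
-- ===== SOURCE B (Python) =====
-- def count_total_bags_inside(rules, bag, evaluated_bags=None):
--     '''
--     Given a dict of bag colors keyed to the bags they can contain, return
--     the total number of bags contained by the specified bag color.
--     Iterative: an explicit stack of (bag, remaining-edges) frames replaces
--     the recursion; pre-seeded evaluated_bags entries are honored like A's memo.
--     '''
--     if bag not in rules: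
--         raise ValueError('bag not found in rules')
--     memo = {} if evaluated_bags is None else evaluated_bags
--     memo[bag] = [0]
--     stack = [(bag, list(reversed(rules[bag])))]
--     while stack:
--         b, todo = stack[-1]
--         if not todo:
--             stack.pop()
--             continue
--         count, inner = todo[0]
--         if inner not in memo:
--             if inner not in rules:
--                 raise ValueError('bag not found in rules')
--             memo[inner] = [0]
--             stack.append((inner, list(reversed(rules[inner]))))
--             continue
--         memo[b][0] += count * (1 + memo[inner][0])
--         del todo[0]
--     return memo[bag][0]
-- ===== Notes on version B (the rewrite author's own statement) =====
-- stated objective: alternative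
-- what changed: Replaced A's recursion plus memo-dict-resident pending-stack while/pop traversal by a fully iterative machine: one while loop over an explicit stack of (bag, remaining-edges) frames, no recursion; same memo reads/updates in the same order, so return values (including on cyclic rule graphs) are identical.
import Mathlib
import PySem

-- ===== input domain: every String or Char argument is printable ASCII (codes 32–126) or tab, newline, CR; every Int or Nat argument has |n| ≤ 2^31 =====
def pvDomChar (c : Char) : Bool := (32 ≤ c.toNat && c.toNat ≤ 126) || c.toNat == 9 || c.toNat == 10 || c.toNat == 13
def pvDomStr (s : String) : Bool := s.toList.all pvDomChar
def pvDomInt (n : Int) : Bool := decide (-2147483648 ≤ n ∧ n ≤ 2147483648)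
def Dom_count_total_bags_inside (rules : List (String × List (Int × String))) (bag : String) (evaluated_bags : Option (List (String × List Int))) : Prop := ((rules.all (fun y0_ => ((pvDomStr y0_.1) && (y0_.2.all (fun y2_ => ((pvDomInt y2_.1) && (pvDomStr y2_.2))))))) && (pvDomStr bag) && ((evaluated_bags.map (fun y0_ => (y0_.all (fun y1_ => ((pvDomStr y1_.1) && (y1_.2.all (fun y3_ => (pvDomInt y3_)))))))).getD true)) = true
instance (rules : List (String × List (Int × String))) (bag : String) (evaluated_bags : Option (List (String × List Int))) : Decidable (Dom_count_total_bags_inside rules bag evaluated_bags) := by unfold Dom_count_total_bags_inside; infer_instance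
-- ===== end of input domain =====

-- B replaces A's recursion-plus-memoized-pending-stack traversal by a fully iterative machine over an
-- explicit stack of (bag, remaining-edges) frames; return values are proved equal — both Pythons also
-- mutate the caller's evaluated_bags dict in place (with slightly different entry shapes), and the
-- equivalence proved here is about the RETURN value only.


-- Both ports read a memo value only through [0] (its head), so the memo carries one Int per bag; a
-- pre-seeded evaluated_bags value is entered as its head (Python reads seed[b][0]; an EMPTY seed
-- list that is actually consulted raises IndexError in Python and is excluded by Pre_, unconsulted
-- ones are never read by either Python).  Both ports burn one fuel unit per processed edge (and one
-- per descent), exactly alike; fuel 2*(total number of edges)+2 is never exhausted when Python A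
-- returns; the fuel-0 and missing-key fallbacks abort with the memo unchanged and correspond to
-- inputs excluded by Pre_ (A raises ValueError / IndexError there).
def pvSeedMemo (evaluated_bags : Option (List (String × List Int))) : PySem.Dict String Int :=
  PySem.Dict.mk (((PySem.Dict.ofList (evaluated_bags.getD [])).items).map (fun kv => (kv.1, kv.2.headD 0)))

def pvFuel (rules : List (String × List (Int × String))) : Nat :=
  2 * (rules.map (fun kv => kv.2.length)).sum + 2

-- ===== PORT A =====
-- A: recursion for a bag not yet in the memo + a while loop that reads the LAST remaining pending
-- edge, recurses if its inner bag is unmemoized, then adds count*(1+memo[inner][0]) to the running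
-- total memo[bag][0] and pops the edge.  The port re-reads the pending edge after the recursion
-- (the edge is consumed on the next dispatch, when inner is memoized) — the same reads, updates and
-- order as the Python; helpers thread the remaining fuel through (pvA_fuel_le below bounds it).
mutual
def pvA_go (d : PySem.Dict String (List (Int × String))) (fuel : Nat) (bag : String) (memo : PySem.Dict String Int) : PySem.Dict String Int × Nat :=
  match PySem.Dict.get? d bag with
  | none => (memo, 0)  -- Python: raise ValueError('bag not found in rules'): abort (outside Pre_)
  | some inners =>
    -- evaluated_bags[bag] = [0, list(rules[bag])]; the while loop pops from the END
    pvA_loop d fuel bag inners.reverse (PySem.Dict.insert memo bag 0)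
termination_by (fuel, 1, 0)
decreasing_by all_goals (simp [Prod.lex_iff]; try omega)
def pvA_loop (d : PySem.Dict String (List (Int × String))) (fuel : Nat) (bag : String) (pending : List (Int × String)) (memo : PySem.Dict String Int) : PySem.Dict String Int × Nat :=
  match pending with
  | [] => (memo, fuel)
  | (count, inner) :: rest =>
    match fuel with
    | 0 => (memo, 0)
    | f+1 =>
      if (PySem.Dict.get? memo inner).isSome then
        pvA_loop d f bag rest
          (PySem.Dict.insert memo bag (PySem.Dict.getD memo bag 0 + count * (1 + PySem.Dict.getD memo inner 0)))
      else
        let r := pvA_go d f inner memo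
        pvA_loop d (min r.2 f) bag ((count, inner) :: rest) r.1
termination_by (fuel, 0, pending.length)
decreasing_by all_goals (simp [Prod.lex_iff]; try omega)
end

def count_total_bags_inside (rules : List (String × List (Int × String))) (bag : String) (evaluated_bags : Option (List (String × List Int))) : Int :=
  let d := PySem.Dict.ofList rules
  match PySem.Dict.get? d bag with
  | none => 0  -- Python: raise ValueError('bag not found in rules') (outside Pre_)
  | some _ => PySem.Dict.getD (pvA_go d (pvFuel rules) bag (pvSeedMemo evaluated_bags)).1 bag 0

-- ===== PORT B =====
-- Source B: a while loop over an explicit stack of (bag, remaining-edges) frames and no recursion.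
-- Top frame with no edges left: pop.  Otherwise read the frame's first edge: unmemoized inner bag
-- present in rules → memo[inner]=[0] and push its frame; unmemoized and missing → ValueError
-- (abort, outside Pre_); memoized → memo[b][0] += count*(1+memo[inner][0]) and consume the edge.
def pvB_machine (d : PySem.Dict String (List (Int × String))) (fuel : Nat) (stack : List (String × List (Int × String))) (memo : PySem.Dict String Int) : PySem.Dict String Int :=
  match stack with
  | [] => memo
  | (b, todo) :: rest =>
    match todo with
    | [] => pvB_machine d fuel rest memo  -- stack.pop()
    | (count, inner) :: todo' =>
      match fuel with
      | 0 => memo  -- unreachable inside Pre_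
      | f+1 =>
        if (PySem.Dict.get? memo inner).isSome then
          pvB_machine d f ((b, todo') :: rest)
            (PySem.Dict.insert memo b (PySem.Dict.getD memo b 0 + count * (1 + PySem.Dict.getD memo inner 0)))
        else
          match PySem.Dict.get? d inner with
          | none => memo  -- Python: raise ValueError('bag not found in rules') (outside Pre_)
          | some l => pvB_machine d f ((inner, l.reverse) :: (b, todo) :: rest) (PySem.Dict.insert memo inner 0)
termination_by (fuel, stack.length)
decreasing_by all_goals (simp [Prod.lex_iff]; try omega)

def count_total_bags_inside_alt (rules : List (String × List (Int × String))) (bag : String) (evaluated_bags : Option (List (String × List Int))) : Int :=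
  let d := PySem.Dict.ofList rules
  match PySem.Dict.get? d bag with
  | none => 0  -- raise ValueError (outside Pre_)
  | some l =>
    PySem.Dict.getD
      (pvB_machine d (pvFuel rules) [(bag, l.reverse)] (PySem.Dict.insert (pvSeedMemo evaluated_bags) bag 0)) bag 0

-- ===== PRECONDITION & SPEC =====
-- Reachability condition on the input rule GRAPH (not a copy of either port: it computes no counts,
-- keeps no memo and its path-cut differs from the ports' traversal): walking the containment edges
-- from b, cutting at bags already on the current path and at pre-seeded bags, every bag reached must
-- be a key of rules (else Python raises ValueError) and every pre-seeded bag reached must carry a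
-- non-empty seed list (else Python raises IndexError).  'b is reachable from bag' cannot be stated
-- without walking the edges; paths have pairwise-distinct in-rules bags, so depth rules.length + 2
-- never cuts a genuine violation.
def pvCheck (d : PySem.Dict String (List (Int × String))) (seen : PySem.Dict String (List Int)) (fuel : Nat) (visited : PySem.Set String) (b : String) : Bool :=
  match fuel with
  | 0 => false
  | f+1 =>
    if b ∈ visited then true
    else
      match PySem.Dict.get? seen b with
      | some v => !v.isEmpty
      | none =>
        match PySem.Dict.get? d b with
        | none => false
        | some l => l.all (fun ci => pvCheck d seen f (PySem.Set.add visited b) ci.2)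

-- Pre_ holds exactly when Python A returns normally: it excludes the inputs where A raises
-- (ValueError: the queried bag, or an unmemoized bag reached by the traversal, is missing from
-- rules; IndexError: a pre-seeded bag whose seed list is empty is consulted).  A pre-seeded entry
-- for the queried bag itself is ignored (A overwrites it before reading it), hence the erase.
def Pre_count_total_bags_inside (rules : List (String × List (Int × String))) (bag : String) (evaluated_bags : Option (List (String × List Int))) : Prop :=
  pvCheck (PySem.Dict.ofList rules) ((PySem.Dict.ofList (evaluated_bags.getD [])).erase bag) (rules.length + 2) [] bag = true
instance (rules : List (String × List (Int × String))) (bag : String) (evaluated_bags : Option (List (String × List Int))) : Decidable (Pre_count_total_bags_inside rules bag evaluated_bags) := by unfold Pre_count_total_bags_inside; infer_instance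

def pvWitness_count_total_bags_inside : (List (String × List (Int × String))) × String × (Option (List (String × List Int))) :=
  ([("shiny gold", [(2, "dark red"), (3, "shiny gold")]), ("dark red", [])], "shiny gold", some [("dark red", [3])])

def Spec_count_total_bags_inside (rules : List (String × List (Int × String))) (bag : String) (evaluated_bags : Option (List (String × List Int))) (out : Int) : Prop := out = count_total_bags_inside_alt rules bag evaluated_bags
instance (rules : List (String × List (Int × String))) (bag : String) (evaluated_bags : Option (List (String × List Int))) (out : Int) : Decidable (Spec_count_total_bags_inside rules bag evaluated_bags out) := by unfold Spec_count_total_bags_inside; infer_instance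

-- ===== CLAIM (what is proved, stated in full; the proofs are below) =====
def Claim_equal_count_total_bags_inside : Prop := ∀ (rules : List (String × List (Int × String))) (bag : String) (evaluated_bags : Option (List (String × List Int))), Dom_count_total_bags_inside rules bag evaluated_bags → Pre_count_total_bags_inside rules bag evaluated_bags → Spec_count_total_bags_inside rules bag evaluated_bags (count_total_bags_inside rules bag evaluated_bags)

-- ===== LEMMAS AND PROOFS =====

-- at fuel 0 the machine leaves the memo unchanged (only free pops remain)
lemma pvB_machine_zero (d : PySem.Dict String (List (Int × String))) : ∀ (stack : List (String × List (Int × String))) (memo : PySem.Dict String Int), pvB_machine d 0 stack memo = memo := by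
  intro stack
  induction stack with
  | nil => intro memo; rw [pvB_machine]
  | cons fr rest ih =>
    intro memo
    obtain ⟨b, todo⟩ := fr
    cases todo with
    | nil => rw [pvB_machine]; exact ih memo
    | cons e todo' => rw [pvB_machine]

-- the fuel threaded out of A's helpers never exceeds the fuel threaded in
lemma pvA_fuel_le (d : PySem.Dict String (List (Int × String))) : ∀ (fuel : Nat) (bag : String) (pending : List (Int × String)) (memo : PySem.Dict String Int), (pvA_loop d fuel bag pending memo).2 ≤ fuel := by
  intro fuel
  induction fuel using Nat.strong_induction_on with
  | _ fuel ih =>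
    intro bag pending memo
    cases pending with
    | nil => rw [pvA_loop]
    | cons e rest =>
      obtain ⟨count, inner⟩ := e
      cases fuel with
      | zero => rw [pvA_loop]
      | succ f =>
        rw [pvA_loop]
        by_cases hmem : (PySem.Dict.get? memo inner).isSome
        · rw [if_pos hmem]
          exact le_trans (ih f (by omega) bag rest _) (by omega)
        · rw [if_neg hmem]
          have h1 := ih (min (pvA_go d f inner memo).2 f) (by omega) bag ((count, inner) :: rest) (pvA_go d f inner memo).1
          exact le_trans h1 (le_trans (min_le_right _ _) (by omega))

-- simulation: one frame of the machine computes exactly what A's loop computes, and the machine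
-- continues below it with the fuel A's loop threads out
lemma pvBridge (d : PySem.Dict String (List (Int × String))) : ∀ (fuel : Nat) (b : String) (todo : List (Int × String)) (rest : List (String × List (Int × String))) (memo : PySem.Dict String Int),
    pvB_machine d fuel ((b, todo) :: rest) memo =
    pvB_machine d (pvA_loop d fuel b todo memo).2 rest (pvA_loop d fuel b todo memo).1 := by
  intro fuel
  induction fuel using Nat.strong_induction_on with
  | _ fuel ih =>
    intro b todo rest memo
    cases todo with
    | nil => rw [pvB_machine, pvA_loop]
    | cons e todo' =>
      obtain ⟨count, inner⟩ := e
      cases fuel with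
      | zero =>
        rw [pvB_machine, pvA_loop]
        exact (pvB_machine_zero d rest memo).symm
      | succ f =>
        rw [pvB_machine, pvA_loop]
        by_cases hmem : (PySem.Dict.get? memo inner).isSome
        · rw [if_pos hmem, if_pos hmem]
          exact ih f (by omega) b todo' rest _
        · rw [if_neg hmem, if_neg hmem]
          cases hd : PySem.Dict.get? d inner with
          | none =>
            -- ValueError: A's recursive call aborts with fuel 0, the machine stops
            have hgo0 : pvA_go d f inner memo = (memo, 0) := by rw [pvA_go, hd]
            dsimp only
            rw [hgo0]
            have habort : pvA_loop d (min (0 : Nat) f) b ((count, inner) :: todo') memo = (memo, 0) := by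
              rw [Nat.zero_min, pvA_loop]
            rw [habort]
            exact (pvB_machine_zero d rest memo).symm
          | some l =>
            -- descend: the machine pushes the child frame, A recurses
            have hgo : pvA_go d f inner memo = pvA_loop d f inner l.reverse (PySem.Dict.insert memo inner 0) := by
              rw [pvA_go, hd]
            dsimp only
            rw [hgo]
            rw [min_eq_left (pvA_fuel_le d f inner l.reverse _)]
            rw [ih f (by omega) inner l.reverse ((b, (count, inner) :: todo') :: rest) (PySem.Dict.insert memo inner 0)]
            exact ih (pvA_loop d f inner l.reverse (PySem.Dict.insert memo inner 0)).2
              (by have := pvA_fuel_le d f inner l.reverse (PySem.Dict.insert memo inner 0); omega)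
              b ((count, inner) :: todo') rest (pvA_loop d f inner l.reverse (PySem.Dict.insert memo inner 0)).1

-- ===== VERDICT (by name: the statement is the Claim_ definition above) =====
theorem count_total_bags_inside_spec : Claim_equal_count_total_bags_inside := by
  intro rules bag ev _hdom _hpre
  simp only [Spec_count_total_bags_inside, count_total_bags_inside, count_total_bags_inside_alt]
  cases hd : PySem.Dict.get? (PySem.Dict.ofList rules) bag with
  | none => rfl
  | some l =>
    dsimp only
    have hbridge := pvBridge (PySem.Dict.ofList rules) (pvFuel rules) bag l.reverse []
      (PySem.Dict.insert (pvSeedMemo ev) bag 0)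
    have hgo : pvA_go (PySem.Dict.ofList rules) (pvFuel rules) bag (pvSeedMemo ev) =
        pvA_loop (PySem.Dict.ofList rules) (pvFuel rules) bag l.reverse (PySem.Dict.insert (pvSeedMemo ev) bag 0) := by
      rw [pvA_go, hd]
    rw [hbridge, hgo, pvB_machine]
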